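-- pv_equiv track=rewrite | github.com/mpaweb/Annuaire | app/routes/export.py | _map_headers
-- ===== SOURCE A (Python) =====
-- def _map_headers(raw_headers: list[str], aliases: dict) -> dict:
--     """Retourne {index_colonne: champ_modele} selon les aliases."""
--     mapping = {}
--     for idx, h in enumerate(raw_headers):
--         h_clean = h.strip().lower().replace(" ", "_").replace("-", "_")
--         for field, alts in aliases.items():
--             if h_clean in alts and field not in mapping.values():
--                 mapping[idx] = field
--                 break
--     return mapping
-- ===== SOURCE B (Python) =====
-- def _map_headers(raw_headers: list[str], aliases: dict) -> dict:
--     """Retourne {index_colonne: champ_modele} selon les aliases."""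
--     # reverse index: alias -> fields that accept it, in aliases order
--     rev = {}
--     for field, alts in aliases.items():
--         for a in alts:
--             rev.setdefault(a, []).append(field)
--     used = set()
--     mapping = {}
--     for idx, h in enumerate(raw_headers):
--         key = h.strip().lower().replace(" ", "_").replace("-", "_")
--         f = next((f for f in rev.get(key, ()) if f not in used), None)
--         if f is not None:
--             mapping[idx] = f
--             used.add(f)
--     return mapping
-- ===== Notes on version B (the rewrite author's own statement) =====
-- stated objective: faster
-- what changed: B precomputes a reverse alias->ordered-fields index once and tracks used fields in a set, so each header is resolved by one dict lookup plus a scan of its few candidate fields instead of rescanning all aliases and all mapping values.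
import Mathlib
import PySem

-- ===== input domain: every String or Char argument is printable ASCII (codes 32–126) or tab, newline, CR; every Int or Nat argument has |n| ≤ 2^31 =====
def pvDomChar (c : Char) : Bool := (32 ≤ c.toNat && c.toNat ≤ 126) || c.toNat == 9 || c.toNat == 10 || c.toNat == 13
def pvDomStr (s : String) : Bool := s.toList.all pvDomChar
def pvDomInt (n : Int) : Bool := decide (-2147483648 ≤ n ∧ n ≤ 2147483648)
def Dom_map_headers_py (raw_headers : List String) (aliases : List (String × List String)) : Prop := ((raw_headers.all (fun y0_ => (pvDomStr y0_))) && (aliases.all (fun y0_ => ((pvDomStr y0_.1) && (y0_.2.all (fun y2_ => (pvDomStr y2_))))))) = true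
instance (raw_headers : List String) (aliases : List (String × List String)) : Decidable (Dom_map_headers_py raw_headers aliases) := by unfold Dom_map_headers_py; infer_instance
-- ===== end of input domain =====

-- B precomputes a reverse alias→fields index and a used-fields set (one lookup per header
-- instead of rescanning all aliases and all mapped values); same return value, proved equal.


-- h.strip().lower().replace(" ", "_").replace("-", "_")
def pvClean (h : String) : String :=
  PySem.Str.replace (PySem.Str.replace (PySem.Str.lower (PySem.Str.strip h)) " " "_") "-" "_"

-- ===== PORT A =====
-- A's inner loop over aliases.items(); 'mapping[idx] = field' is a dict assignment at a
-- FRESH key (the enumerate index, never assigned before), so it appends — exact here.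
def pvInnerA (hc : String) (idx : Int) (aliases : List (String × List String))
    (mapping : List (Int × String)) : List (Int × String) :=
  match aliases with
  | [] => mapping
  | (field, alts) :: rest =>
    if alts.contains hc && !((mapping.map Prod.snd).contains field) then
      mapping ++ [(idx, field)]
    else pvInnerA hc idx rest mapping

def map_headers_py (raw_headers : List String) (aliases : List (String × List String)) : List (Int × String) :=
  (PySem.List.enumerate raw_headers 0).foldl
    (fun mapping p => pvInnerA (pvClean p.2) p.1 aliases mapping) []

-- ===== PORT B =====
-- rev.setdefault(a, []).append(field)  ≡  rev[a] = rev.get(a, []) + [field]  (Dict.modify)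
def pvBuildRev (aliases : List (String × List String)) : PySem.Dict String (List String) :=
  aliases.foldl (fun rev fa => fa.2.foldl (fun r a => r.modify a [] (· ++ [fa.1])) rev)
    PySem.Dict.empty

-- f = next((f for f in fields if f not in used), None); if f is not None: record it.
-- 'mapping[idx] = f' at the FRESH enumerate index appends — exact here.
def pvPick (idx : Int) (st : List (Int × String) × PySem.Set String) (fields : List String) :
    List (Int × String) × PySem.Set String :=
  match fields.find? (fun f => !(PySem.Set.contains st.2 f)) with
  | none => st
  | some f => (st.1 ++ [(idx, f)], PySem.Set.add st.2 f)

def map_headers_py_alt (raw_headers : List String) (aliases : List (String × List String)) : List (Int × String) :=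
  let rev := pvBuildRev aliases
  ((PySem.List.enumerate raw_headers 0).foldl
    (fun st p => pvPick p.1 st (rev.getD (pvClean p.2) []))
    ([], PySem.Set.empty)).1

-- ===== PRECONDITION & SPEC =====
def Spec_map_headers_py (raw_headers : List String) (aliases : List (String × List String)) (out : List (Int × String)) : Prop := out = map_headers_py_alt raw_headers aliases
instance (raw_headers : List String) (aliases : List (String × List String)) (out : List (Int × String)) : Decidable (Spec_map_headers_py raw_headers aliases out) := by unfold Spec_map_headers_py; infer_instance

-- ===== CLAIM (what is proved, stated in full; the proofs are below) =====
def Claim_equal_map_headers_py : Prop := ∀ (raw_headers : List String) (aliases : List (String × List String)), Dom_map_headers_py raw_headers aliases → Spec_map_headers_py raw_headers aliases (map_headers_py raw_headers aliases)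

-- ===== LEMMAS AND PROOFS =====

-- spec-level description of the reverse index at one key
def pvRevGet (aliases : List (String × List String)) (hc : String) : List String :=
  aliases.flatMap (fun fa => (fa.2.filter (fun a => a == hc)).map (fun _ => fa.1))

theorem pvBuildRev_getD (aliases : List (String × List String))
    (rev : PySem.Dict String (List String)) (hc : String) :
    (aliases.foldl (fun rev fa => fa.2.foldl (fun r a => r.modify a [] (· ++ [fa.1])) rev)
      rev).getD hc [] = rev.getD hc [] ++ pvRevGet aliases hc := by
  induction aliases generalizing rev with
  | nil => simp [pvRevGet]
  | cons fa rest ih =>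
    rw [List.foldl_cons, ih]
    have h1 : fa.2.foldl (fun r a => r.modify a [] (· ++ [fa.1])) rev
        = (fa.2.map (fun a => (a, fa.1))).foldl (fun d p => d.modify p.1 [] (· ++ [p.2])) rev := by
      rw [List.foldl_map]
    rw [h1, PySem.Dict.getD_foldl_modify_append]
    simp [pvRevGet, List.filter_map, Function.comp_def]

def pvInv (used : PySem.Set String) (mapping : List (Int × String)) : Prop :=
  ∀ g, g ∈ used ↔ g ∈ mapping.map Prod.snd

theorem pvFind_skip {α : Type} (p : String → Bool) (f : String) (hpf : p f = false) :
    ∀ (l : List α) (r : List String),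
      List.find? p (l.map (fun _ => f) ++ r) = List.find? p r := by
  intro l
  induction l with
  | nil => intro r; rw [List.map_nil, List.nil_append]
  | cons x xs ih =>
    intro r
    rw [List.map_cons, List.cons_append, List.find?_cons_of_neg (by simp [hpf]), ih r]

theorem pvInner_eq (hc : String) (idx : Int) (aliases : List (String × List String))
    (mapping : List (Int × String)) (used : PySem.Set String) (hinv : pvInv used mapping) :
    (pvPick idx (mapping, used) (pvRevGet aliases hc)).1 = pvInnerA hc idx aliases mapping ∧
    pvInv (pvPick idx (mapping, used) (pvRevGet aliases hc)).2
          (pvPick idx (mapping, used) (pvRevGet aliases hc)).1 := by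
  induction aliases with
  | nil => exact ⟨rfl, hinv⟩
  | cons fa rest ih =>
    obtain ⟨field, alts⟩ := fa
    have hflat : pvRevGet ((field, alts) :: rest) hc
        = ((alts.filter (fun a => a == hc)).map (fun _ => field)) ++ pvRevGet rest hc := by
      simp only [pvRevGet, List.flatMap_cons]
    by_cases hcmem : hc ∈ alts
    · -- some alias of this field matches the cleaned header
      have hcin : alts.contains hc = true := List.contains_iff_mem.mpr hcmem
      have hne : alts.filter (fun a => a == hc) ≠ [] := by
        intro h0
        have := List.filter_eq_nil_iff.mp h0 hc hcmem
        simp at this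
      cases hfe : alts.filter (fun a => a == hc) with
      | nil => exact absurd hfe hne
      | cons x xs =>
        rw [hflat, hfe]
        by_cases hu : field ∈ used
        · -- field already used: B's generator skips it, A's condition is false
          have husedB : PySem.Set.contains used field = true :=
            (PySem.Set.contains_iff _ _).mpr hu
          have husedA : (mapping.map Prod.snd).contains field = true :=
            List.contains_iff_mem.mpr ((hinv field).mp hu)
          have hcond : (alts.contains hc && !((mapping.map Prod.snd).contains field)) = false := by
            rw [husedA]; simp
          have hA : pvInnerA hc idx ((field, alts) :: rest) mapping
              = pvInnerA hc idx rest mapping := by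
            simp only [pvInnerA]
            rw [hcond, if_neg (by simp)]
          have hskip : List.find? (fun f => !(PySem.Set.contains used f))
              (((x :: xs).map (fun _ => field)) ++ pvRevGet rest hc)
              = List.find? (fun f => !(PySem.Set.contains used f)) (pvRevGet rest hc) :=
            pvFind_skip _ field (by rw [husedB]; rfl) (x :: xs) _
          have hP : pvPick idx (mapping, used)
              (((x :: xs).map (fun _ => field)) ++ pvRevGet rest hc)
              = pvPick idx (mapping, used) (pvRevGet rest hc) := by
            simp only [pvPick]
            rw [hskip]
          rw [hP, hA]
          exact ih
        · -- field unused: B's generator yields it first, A picks it too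
          have husedB : PySem.Set.contains used field = false :=
            Bool.eq_false_iff.mpr (fun hcontra => hu ((PySem.Set.contains_iff _ _).mp hcontra))
          have husedA : (mapping.map Prod.snd).contains field = false :=
            Bool.eq_false_iff.mpr
              (fun hcontra => hu ((hinv field).mpr (List.contains_iff_mem.mp hcontra)))
          have hcond : (alts.contains hc && !((mapping.map Prod.snd).contains field)) = true := by
            rw [hcin, husedA]; simp
          have hA : pvInnerA hc idx ((field, alts) :: rest) mapping
              = mapping ++ [(idx, field)] := by
            simp only [pvInnerA]
            rw [hcond, if_pos rfl]
          have hfind : List.find? (fun f => !(PySem.Set.contains used f))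
              (((x :: xs).map (fun _ => field)) ++ pvRevGet rest hc) = some field := by
            rw [List.map_cons, List.cons_append,
              List.find?_cons_of_pos (by rw [husedB]; rfl)]
          have hP : pvPick idx (mapping, used)
              (((x :: xs).map (fun _ => field)) ++ pvRevGet rest hc)
              = (mapping ++ [(idx, field)], PySem.Set.add used field) := by
            simp only [pvPick]
            rw [hfind]
          rw [hP, hA]
          refine ⟨rfl, fun g => ?_⟩
          rw [PySem.Set.mem_add, hinv g]
          simp
    · -- no alias of this field matches: both sides move on
      have hcin : alts.contains hc = false :=
        Bool.eq_false_iff.mpr (fun hcontra => hcmem (List.contains_iff_mem.mp hcontra))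
      have hnil : alts.filter (fun a => a == hc) = [] := by
        refine List.filter_eq_nil_iff.mpr (fun a ha h => ?_)
        exact hcmem (by rw [← show a = hc from beq_iff_eq.mp h]; exact ha)
      have hcond : (alts.contains hc && !((mapping.map Prod.snd).contains field)) = false := by
        rw [hcin]; simp
      have hA : pvInnerA hc idx ((field, alts) :: rest) mapping
          = pvInnerA hc idx rest mapping := by
        simp only [pvInnerA]
        rw [hcond, if_neg (by simp)]
      rw [hflat, hnil, List.map_nil, List.nil_append, hA]
      exact ih

theorem pvOuter_eq (aliases : List (String × List String)) :
    ∀ (headers : List String) (s : Int) (st : List (Int × String) × PySem.Set String),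
      pvInv st.2 st.1 →
      ((PySem.List.enumerate headers s).foldl
        (fun st p => pvPick p.1 st ((pvBuildRev aliases).getD (pvClean p.2) [])) st).1
      = (PySem.List.enumerate headers s).foldl
          (fun mapping p => pvInnerA (pvClean p.2) p.1 aliases mapping) st.1 := by
  intro headers
  induction headers with
  | nil => intro s st _; simp [PySem.List.enumerate_nil]
  | cons h hs ih =>
    intro s st hinv
    have hrev : (pvBuildRev aliases).getD (pvClean h) [] = pvRevGet aliases (pvClean h) := by
      unfold pvBuildRev
      rw [pvBuildRev_getD]
      simp
    simp only [PySem.List.enumerate_cons, List.foldl_cons]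
    rw [hrev]
    have hmain := pvInner_eq (pvClean h) s aliases st.1 st.2 hinv
    rw [ih (s + 1) _ hmain.2, hmain.1]

-- ===== VERDICT (by name: the statement is the Claim_ definition above) =====
theorem map_headers_py_spec : Claim_equal_map_headers_py := by
  intro raw_headers aliases _
  unfold Spec_map_headers_py map_headers_py map_headers_py_alt
  exact (pvOuter_eq aliases raw_headers 0 ([], PySem.Set.empty)
    (fun g => by simp [PySem.Set.empty])).symm
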